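-- pv_equiv track=rewrite | github.com/SedatCeyhan/Algorithms_Solutions | Akuna Capital/throttleGetaways.py | findBeforeMatrix
-- ===== SOURCE A (Python) =====
-- def findBeforeMatrix(after):
--     # Write your code here
--     if len(after) == 0 or len(after[0]) == 0: return []
--     row, col = len(after), len(after[0])
--     before = [[0] * (col) for i in range(row)]
--     dict = {}
--
--     # Base case: The 1 dimensional row and column
--     before[0][0] = after[0][0]
--     for i in range(1, col):
--         before[0][i] = after[0][i] - after[0][i - 1]
--         dict[i] = before[0][i]
--
--     for j in range(1, row):
--         before[j][0] = after[j][0] - after[j - 1][0]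
--
--     for i in range(1, row):
--         for j in range(1, col):
--             val = after[i][j] - after[i][j - 1]
--             before[i][j] = val - dict[j]
--             dict[j] += before[i][j]
--
--     return before
-- ===== SOURCE B (Python) =====
-- def findBeforeMatrix(after):
--     # Closed-form inversion of the 2D prefix sum: one uniform double loop,
--     # each cell read directly from `after`, no dict and no running sums.
--     if not after or not after[0]:
--         return []
--     col = len(after[0])
--     return [[after[i][j]
--              - (after[i - 1][j] if i else 0)
--              - (after[i][j - 1] if j else 0)
--              + (after[i - 1][j - 1] if i and j else 0)
--              for j in range(col)]
--             for i in range(len(after))]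
-- ===== Notes on version B (the rewrite author's own statement) =====
-- stated objective: simpler
-- what changed: Replaces A's four phases (zero matrix, first-row loop, first-column loop, nested loop threading running column sums through a dict) by the standard closed-form inversion before[i][j] = after[i][j] - after[i-1][j] - after[i][j-1] + after[i-1][j-1] with boundary terms zeroed, built as one uniform double comprehension with no mutation and no dict.
import Mathlib
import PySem

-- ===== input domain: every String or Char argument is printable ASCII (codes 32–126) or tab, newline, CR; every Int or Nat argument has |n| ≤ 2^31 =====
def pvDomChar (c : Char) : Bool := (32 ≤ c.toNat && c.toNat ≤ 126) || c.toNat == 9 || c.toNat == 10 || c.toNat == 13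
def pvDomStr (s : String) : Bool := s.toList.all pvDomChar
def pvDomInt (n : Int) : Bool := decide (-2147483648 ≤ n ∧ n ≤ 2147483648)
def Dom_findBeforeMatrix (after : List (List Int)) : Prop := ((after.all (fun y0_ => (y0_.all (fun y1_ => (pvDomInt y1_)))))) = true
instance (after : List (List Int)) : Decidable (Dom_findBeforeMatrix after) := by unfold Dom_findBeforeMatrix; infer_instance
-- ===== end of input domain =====

-- B replaces A's four phases and running dict by the closed-form inversion
-- before[i][j] = after[i][j] - after[i-1][j] - after[i][j-1] + after[i-1][j-1]
-- (boundary terms zeroed), computed in one uniform double loop: simpler, same cost.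


-- ===== PORT A =====
-- after[i][j] for Nat indices known in range under Pre_ (exact there; getD never fires its default)
def pvGet2 (m : List (List Int)) (i j : Nat) : Int := (m.getD i []).getD j 0
-- before[i][j] = v (indices always in range for the freshly built `before`)
def pvSet2 (m : List (List Int)) (i j : Nat) (v : Int) : List (List Int) :=
  m.set i ((m.getD i []).set j v)

-- A's first loop body: before[0][i] = after[0][i] - after[0][i-1]; dict[i] = before[0][i]
def pvStep1 (after : List (List Int)) (s : List (List Int) × PySem.Dict Nat Int) (k : Nat) :
    List (List Int) × PySem.Dict Nat Int :=
  let i := k + 1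
  let v := pvGet2 after 0 i - pvGet2 after 0 (i - 1)
  (pvSet2 s.1 0 i v, s.2.insert i v)
-- A's second loop body: before[j][0] = after[j][0] - after[j-1][0]
def pvStep2 (after : List (List Int)) (b : List (List Int)) (k : Nat) : List (List Int) :=
  let j := k + 1
  pvSet2 b j 0 (pvGet2 after j 0 - pvGet2 after (j - 1) 0)
-- A's inner loop body (row i): val = after[i][j]-after[i][j-1]; before[i][j] = val - dict[j]; dict[j] += before[i][j]
def pvStep3 (after : List (List Int)) (i : Nat) (t : List (List Int) × PySem.Dict Nat Int) (k2 : Nat) :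
    List (List Int) × PySem.Dict Nat Int :=
  let j := k2 + 1
  let val := pvGet2 after i j - pvGet2 after i (j - 1)
  let bv := val - t.2.getD j 0
  (pvSet2 t.1 i j bv, t.2.insert j (t.2.getD j 0 + bv))
-- A's outer loop body: the whole inner loop for row k+1
def pvStep3Row (after : List (List Int)) (col : Nat) (s : List (List Int) × PySem.Dict Nat Int) (k : Nat) :
    List (List Int) × PySem.Dict Nat Int :=
  (List.range (col - 1)).foldl (pvStep3 after (k + 1)) s

-- Literal port of A.  `for i in range(1, n)` is folded over `List.range (n-1)` with i = k+1
-- (the same values in the same order); the dict keys 1..col-1 are the same ints, held as Nat.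
def findBeforeMatrix (after : List (List Int)) : List (List Int) :=
  if after.length = 0 ∨ (after.headD []).length = 0 then []
  else
    let row := after.length
    let col := (after.headD []).length
    let before := (List.range row).map (fun _ => List.replicate col 0)
    let before := pvSet2 before 0 0 (pvGet2 after 0 0)
    let s1 := (List.range (col - 1)).foldl (pvStep1 after) (before, PySem.Dict.empty)
    let before2 := (List.range (row - 1)).foldl (pvStep2 after) s1.1
    let s3 := (List.range (row - 1)).foldl (pvStep3Row after col) (before2, s1.2)
    s3.1

-- ===== PORT B =====
-- Literal port of Source B: one double comprehension over the closed form.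
def findBeforeMatrix_alt (after : List (List Int)) : List (List Int) :=
  if after = [] ∨ after.headD [] = [] then []
  else
    let col := (after.headD []).length
    (List.range after.length).map (fun i =>
      (List.range col).map (fun j =>
        pvGet2 after i j
        - (if i ≠ 0 then pvGet2 after (i - 1) j else 0)
        - (if j ≠ 0 then pvGet2 after i (j - 1) else 0)
        + (if i ≠ 0 ∧ j ≠ 0 then pvGet2 after (i - 1) (j - 1) else 0)))

-- ===== PRECONDITION & SPEC =====
-- Pre_ excludes exactly the ragged inputs with a row shorter than the first row, on which
-- the Python A raises IndexError (B raises there too).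
def Pre_findBeforeMatrix (after : List (List Int)) : Prop :=
  ∀ r ∈ after, (after.headD []).length ≤ r.length
instance (after : List (List Int)) : Decidable (Pre_findBeforeMatrix after) := by
  unfold Pre_findBeforeMatrix; infer_instance

def pvWitness_findBeforeMatrix : List (List Int) := [[1, 3], [4, 10]]

def Spec_findBeforeMatrix (after : List (List Int)) (out : List (List Int)) : Prop := out = findBeforeMatrix_alt after
instance (after : List (List Int)) (out : List (List Int)) : Decidable (Spec_findBeforeMatrix after out) := by unfold Spec_findBeforeMatrix; infer_instance

-- ===== CLAIM (what is proved, stated in full; the proofs are below) =====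
def Claim_equal_findBeforeMatrix : Prop := ∀ (after : List (List Int)), Dom_findBeforeMatrix after → Pre_findBeforeMatrix after → Spec_findBeforeMatrix after (findBeforeMatrix after)

-- ===== LEMMAS AND PROOFS =====

-- B's per-cell closed form, named (proof-side only)
def pvCf (after : List (List Int)) (i j : Nat) : Int :=
  pvGet2 after i j
  - (if i ≠ 0 then pvGet2 after (i - 1) j else 0)
  - (if j ≠ 0 then pvGet2 after i (j - 1) else 0)
  + (if i ≠ 0 ∧ j ≠ 0 then pvGet2 after (i - 1) (j - 1) else 0)
-- horizontal difference: the value A keeps in dict[j] after processing row i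
def pvD (after : List (List Int)) (i j : Nat) : Int :=
  pvGet2 after i j - pvGet2 after i (j - 1)
-- row i with cells 0..t already computed, the rest still 0
def pvPartial (after : List (List Int)) (col i t : Nat) : List Int :=
  (List.range col).map (fun j => if j ≤ t then pvCf after i j else 0)
-- row i fully computed
def pvFull (after : List (List Int)) (col i : Nat) : List Int :=
  (List.range col).map (pvCf after i)
-- the matrix during phase 3: rows below c finished, the rest only column 0
def pvRows3 (after : List (List Int)) (col c i : Nat) : List Int :=
  if i < c then pvFull after col i else pvPartial after col i 0
-- the matrix during phase 2: row 0 finished, rows 1..t have column 0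
def pvRows2 (after : List (List Int)) (col t i : Nat) : List Int :=
  if i = 0 then pvFull after col 0 else if i ≤ t then pvPartial after col i 0
  else List.replicate col 0

theorem pv_getD_map_range {α : Type} (g : Nat → α) (d : α) (n i : Nat) :
    ((List.range n).map g).getD i d = if i < n then g i else d := by
  rcases Nat.lt_or_ge i n with h | h
  · rw [List.getD_eq_getElem _ _ (by simpa using h)]; simp [h]
  · rw [List.getD_eq_default _ _ (by simpa using h)]; simp [Nat.not_lt.mpr h]

theorem pv_set_map_range {α : Type} (g : Nat → α) (n i : Nat) (v : α) :
    ((List.range n).map g).set i v = (List.range n).map (fun i' => if i' = i then v else g i') := by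
  apply List.ext_getElem
  · simp
  · intro k h1 h2
    simp only [List.getElem_set, List.getElem_map, List.getElem_range]
    by_cases h : i = k
    · simp [h]
    · rw [if_neg h, if_neg (fun hh => h hh.symm)]

theorem pv_pvSet2_map_range (g : Nat → List Int) {n i : Nat} (hi : i < n) (j : Nat) (v : Int) :
    pvSet2 ((List.range n).map g) i j v
      = (List.range n).map (fun i' => if i' = i then (g i).set j v else g i') := by
  unfold pvSet2
  rw [pv_getD_map_range, if_pos hi, pv_set_map_range]

theorem pv_map_range_congr {α : Type} {f g : Nat → α} {n : Nat} (h : ∀ k, k < n → f k = g k) :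
    (List.range n).map f = (List.range n).map g :=
  List.map_congr_left (fun k hk => h k (List.mem_range.mp hk))

theorem pv_replicate_eq_map (n : Nat) (c : Int) :
    List.replicate n c = (List.range n).map (fun _ => c) := by
  simp [List.map_const']

-- values of the closed form at the four kinds of cells
theorem pvCf_zero_zero (after : List (List Int)) : pvCf after 0 0 = pvGet2 after 0 0 := by
  simp [pvCf]
theorem pvCf_zero_succ (after : List (List Int)) {j : Nat} (hj : j ≠ 0) :
    pvCf after 0 j = pvGet2 after 0 j - pvGet2 after 0 (j - 1) := by
  simp [pvCf, hj]
theorem pvCf_succ_zero (after : List (List Int)) {i : Nat} (hi : i ≠ 0) :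
    pvCf after i 0 = pvGet2 after i 0 - pvGet2 after (i - 1) 0 := by
  simp [pvCf, hi]
theorem pvCf_succ_succ (after : List (List Int)) {i j : Nat} (hi : i ≠ 0) (hj : j ≠ 0) :
    pvCf after i j = pvD after i j - pvD after (i - 1) j := by
  simp [pvCf, pvD, hi, hj]; ring

-- Phase 1: row 0 gets cells 0..t of the closed form, dict[j] = before[0][j] for 1 ≤ j ≤ t
theorem pv_phase1 (after : List (List Int)) (row col : Nat) (hrow : 0 < row) (t : Nat) :
    ∃ d : PySem.Dict Nat Int,
      (List.range t).foldl (pvStep1 after)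
        (pvSet2 ((List.range row).map (fun _ => List.replicate col (0:Int))) 0 0 (pvGet2 after 0 0),
         PySem.Dict.empty)
      = ((List.range row).map (fun i => if i = 0 then pvPartial after col 0 t
            else List.replicate col 0), d)
      ∧ ∀ j : Nat, d.getD j 0 = if 1 ≤ j ∧ j ≤ t then pvCf after 0 j else 0 := by
  induction t with
  | zero =>
    refine ⟨PySem.Dict.empty, ?_, ?_⟩
    · rw [List.range_zero, List.foldl_nil, pv_pvSet2_map_range _ hrow]
      refine congrArg (fun m => (m, PySem.Dict.empty)) (pv_map_range_congr ?_)
      intro k _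
      by_cases hk : k = 0
      · subst hk
        rw [if_pos rfl, if_pos rfl, pv_replicate_eq_map, pv_set_map_range, pvPartial]
        refine pv_map_range_congr ?_
        intro j _
        by_cases hj : j = 0
        · simp [hj, pvCf_zero_zero]
        · simp [hj]
      · simp [hk]
    · intro j; rw [PySem.Dict.getD_empty, if_neg (by omega)]
  | succ t ih =>
    obtain ⟨d, hfold, hd⟩ := ih
    rw [List.range_succ, List.foldl_append, List.foldl_cons, List.foldl_nil, hfold]
    refine ⟨d.insert (t + 1) (pvGet2 after 0 (t + 1) - pvGet2 after 0 (t + 1 - 1)), ?_, ?_⟩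
    · show (pvSet2 _ 0 (t + 1) _, _) = _
      rw [pv_pvSet2_map_range _ hrow]
      refine congrArg (fun m => (m, _)) (pv_map_range_congr ?_)
      intro k _
      by_cases hk : k = 0
      · subst hk
        rw [if_pos rfl, if_pos rfl, if_pos rfl, pvPartial, pvPartial, pv_set_map_range]
        refine pv_map_range_congr ?_
        intro j _
        by_cases hj : j = t + 1
        · subst hj
          rw [if_pos rfl, if_pos (Nat.le_refl _), pvCf_zero_succ after (Nat.succ_ne_zero t)]
        · rw [if_neg hj]
          by_cases hj2 : j ≤ t
          · rw [if_pos hj2, if_pos (Nat.le_succ_of_le hj2)]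
          · rw [if_neg hj2, if_neg (by omega)]
      · simp [hk]
    · intro j
      rw [PySem.Dict.getD_insert, hd j]
      by_cases hj : j = t + 1
      · subst hj
        rw [if_pos rfl, if_pos (by omega), pvCf_zero_succ after (Nat.succ_ne_zero t)]
      · rw [if_neg hj]
        by_cases h2 : 1 ≤ j ∧ j ≤ t
        · rw [if_pos h2, if_pos (by omega)]
        · rw [if_neg h2, if_neg (by omega)]

-- Phase 2: rows 1..t get their column-0 cell
theorem pv_phase2 (after : List (List Int)) (row col : Nat) (t : Nat) (ht : t ≤ row - 1)
    (hrow : 0 < row) :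
    (List.range t).foldl (pvStep2 after) ((List.range row).map (pvRows2 after col 0))
      = (List.range row).map (pvRows2 after col t) := by
  induction t with
  | zero => rfl
  | succ t ih =>
    rw [List.range_succ, List.foldl_append, List.foldl_cons, List.foldl_nil,
        ih (by omega)]
    show pvSet2 _ (t + 1) 0 _ = _
    rw [pv_pvSet2_map_range _ (show t + 1 < row by omega)]
    refine pv_map_range_congr ?_
    intro k _
    by_cases hk : k = t + 1
    · subst hk
      rw [if_pos rfl, pvRows2, pvRows2, if_neg (Nat.succ_ne_zero t), if_neg (by omega),
          if_neg (Nat.succ_ne_zero t), if_pos (Nat.le_refl _), pv_replicate_eq_map,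
          pv_set_map_range, pvPartial]
      refine pv_map_range_congr ?_
      intro j _
      by_cases hj : j = 0
      · subst hj
        rw [if_pos rfl, if_pos (Nat.le_refl 0),
            pvCf_succ_zero after (Nat.succ_ne_zero t)]
      · rw [if_neg hj, if_neg (by omega)]
    · rw [if_neg hk, pvRows2, pvRows2]
      by_cases h0 : k = 0
      · simp [h0]
      · rw [if_neg h0, if_neg h0]
        by_cases h1 : k ≤ t
        · rw [if_pos h1, if_pos (by omega)]
        · rw [if_neg h1, if_neg (by omega)]

-- Phase 3 inner loop: row i gets cells 1..u, dict rolls from row i-1 to row i values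
theorem pv_inner (after : List (List Int)) (row col : Nat) (i : Nat) (hi1 : i ≠ 0)
    (hi : i < row) (u : Nat) (hu : u ≤ col - 1) (d0 : PySem.Dict Nat Int)
    (hd0 : ∀ j : Nat, d0.getD j 0 = if 1 ≤ j ∧ j ≤ col - 1 then pvD after (i - 1) j else 0) :
    ∃ d : PySem.Dict Nat Int,
      (List.range u).foldl (pvStep3 after i)
        ((List.range row).map (pvRows3 after col i), d0)
      = ((List.range row).map (fun i' => if i' = i then pvPartial after col i u
            else pvRows3 after col i i'), d)
      ∧ ∀ j : Nat, d.getD j 0 = if 1 ≤ j ∧ j ≤ col - 1 then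
          (if j ≤ u then pvD after i j else pvD after (i - 1) j) else 0 := by
  induction u with
  | zero =>
    refine ⟨d0, ?_, ?_⟩
    · rw [List.range_zero, List.foldl_nil]
      refine congrArg (fun m => (m, d0)) (pv_map_range_congr ?_)
      intro k _
      by_cases hk : k = i
      · subst hk; rw [if_pos rfl, pvRows3, if_neg (Nat.lt_irrefl k)]
      · rw [if_neg hk]
    · intro j
      rw [hd0 j]
      by_cases h2 : 1 ≤ j ∧ j ≤ col - 1
      · rw [if_pos h2, if_pos h2, if_neg (by omega)]
      · rw [if_neg h2, if_neg h2]
  | succ u ih =>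
    obtain ⟨d, hfold, hd⟩ := ih (by omega)
    rw [List.range_succ, List.foldl_append, List.foldl_cons, List.foldl_nil, hfold]
    have hget : d.getD (u + 1) 0 = pvD after (i - 1) (u + 1) := by
      rw [hd (u + 1), if_pos (by omega), if_neg (by omega)]
    refine ⟨d.insert (u + 1) (d.getD (u + 1) 0 +
        (pvGet2 after i (u + 1) - pvGet2 after i (u + 1 - 1) - d.getD (u + 1) 0)), ?_, ?_⟩
    · show (pvSet2 _ i (u + 1) _, _) = _
      rw [pv_pvSet2_map_range _ hi]
      refine congrArg (fun m => (m, _)) (pv_map_range_congr ?_)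
      intro k _
      by_cases hk : k = i
      · rw [if_pos hk, if_pos hk, if_pos rfl, pvPartial, pvPartial, pv_set_map_range]
        refine pv_map_range_congr ?_
        intro j _
        by_cases hj : j = u + 1
        · subst hj
          rw [if_pos rfl, if_pos (Nat.le_refl _), hget,
              pvCf_succ_succ after hi1 (Nat.succ_ne_zero u)]
          simp only [pvD]
        · rw [if_neg hj]
          by_cases hj2 : j ≤ u
          · rw [if_pos hj2, if_pos (Nat.le_succ_of_le hj2)]
          · rw [if_neg hj2, if_neg (by omega)]
      · rw [if_neg hk, if_neg hk, if_neg hk]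
    · intro j
      rw [PySem.Dict.getD_insert, hget]
      by_cases hj : j = u + 1
      · subst hj
        rw [if_pos rfl, if_pos (by omega), if_pos (Nat.le_refl _)]
        simp only [pvD]
        ring
      · rw [if_neg hj, hd j]
        by_cases h2 : 1 ≤ j ∧ j ≤ col - 1
        · rw [if_pos h2, if_pos h2]
          by_cases h3 : j ≤ u
          · rw [if_pos h3, if_pos (by omega)]
          · rw [if_neg h3, if_neg (by omega)]
        · rw [if_neg h2, if_neg h2]

theorem pv_partial_last (after : List (List Int)) (col i : Nat) :
    pvPartial after col i (col - 1) = pvFull after col i := by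
  refine pv_map_range_congr ?_
  intro j hj
  rw [if_pos (by omega)]

-- Phase 3 outer loop: after t steps rows 0..t are finished
theorem pv_phase3 (after : List (List Int)) (row col : Nat) (t : Nat)
    (ht : t ≤ row - 1) (hrow : 0 < row) (d0 : PySem.Dict Nat Int)
    (hd0 : ∀ j : Nat, d0.getD j 0 = if 1 ≤ j ∧ j ≤ col - 1 then pvD after 0 j else 0) :
    ∃ d : PySem.Dict Nat Int,
      (List.range t).foldl (pvStep3Row after col)
        ((List.range row).map (pvRows3 after col 1), d0)
      = ((List.range row).map (pvRows3 after col (t + 1)), d)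
      ∧ ∀ j : Nat, d.getD j 0 = if 1 ≤ j ∧ j ≤ col - 1 then pvD after t j else 0 := by
  induction t with
  | zero => exact ⟨d0, by rw [List.range_zero, List.foldl_nil], hd0⟩
  | succ t ih =>
    obtain ⟨d, hfold, hd⟩ := ih (by omega)
    rw [List.range_succ, List.foldl_append, List.foldl_cons, List.foldl_nil, hfold]
    obtain ⟨d2, hfold2, hd2⟩ := pv_inner after row col (t + 1) (Nat.succ_ne_zero t)
      (by omega) (col - 1) (Nat.le_refl _) d
      (by intro j; rw [hd j]; simp)
    refine ⟨d2, ?_, ?_⟩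
    · rw [pvStep3Row, hfold2]
      refine congrArg (fun m => (m, d2)) (pv_map_range_congr ?_)
      intro k _
      by_cases hk : k = t + 1
      · subst hk
        rw [if_pos rfl, pv_partial_last, pvRows3, if_pos (by omega)]
      · rw [if_neg hk, pvRows3, pvRows3]
        by_cases h1 : k < t + 1
        · rw [if_pos h1, if_pos (by omega)]
        · rw [if_neg h1, if_neg (by omega)]
    · intro j
      rw [hd2 j]
      by_cases h2 : 1 ≤ j ∧ j ≤ col - 1
      · rw [if_pos h2, if_pos h2, if_pos (by omega)]
      · rw [if_neg h2, if_neg h2]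

-- ===== VERDICT (by name: the statement is the Claim_ definition above) =====
theorem findBeforeMatrix_spec : Claim_equal_findBeforeMatrix := by
  intro after _ _
  show findBeforeMatrix after = findBeforeMatrix_alt after
  rw [findBeforeMatrix, findBeforeMatrix_alt]
  by_cases hg : after.length = 0 ∨ (after.headD []).length = 0
  · rw [if_pos hg, if_pos (by
      rcases hg with h | h
      · exact Or.inl (List.length_eq_zero_iff.mp h)
      · exact Or.inr (List.length_eq_zero_iff.mp h))]
  · rw [not_or] at hg
    obtain ⟨h1, h2⟩ := hg
    have hrow : 0 < after.length := Nat.pos_of_ne_zero h1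
    have hcol : 0 < (after.headD []).length := Nat.pos_of_ne_zero h2
    have hBguard : ¬(after = [] ∨ after.headD [] = []) := by
      rintro (h | h)
      · exact h1 (by rw [h]; rfl)
      · exact h2 (by rw [h]; rfl)
    rw [if_neg (by rw [not_or]; exact ⟨h1, h2⟩), if_neg hBguard]
    set row := after.length with hrowdef
    set col := (after.headD []).length with hcoldef
    obtain ⟨d1, hfold1, hd1⟩ := pv_phase1 after row col hrow (col - 1)
    simp only [hfold1]
    have hM1 : (List.range row).map (fun i => if i = 0 then pvPartial after col 0 (col - 1)
        else List.replicate col 0) = (List.range row).map (pvRows2 after col 0) := by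
      refine pv_map_range_congr ?_
      intro k _
      by_cases hk : k = 0
      · rw [if_pos hk, pvRows2, if_pos hk, pv_partial_last]
      · rw [if_neg hk, pvRows2, if_neg hk, if_neg (by omega)]
    rw [hM1, pv_phase2 after row col (row - 1) (Nat.le_refl _) hrow]
    have hM2 : (List.range row).map (pvRows2 after col (row - 1))
        = (List.range row).map (pvRows3 after col 1) := by
      refine pv_map_range_congr ?_
      intro k hk
      rw [pvRows2, pvRows3]
      by_cases h0 : k = 0
      · subst h0; rw [if_pos rfl, if_pos (by omega)]
      · rw [if_neg h0, if_pos (by omega), if_neg (by omega)]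
    rw [hM2]
    obtain ⟨d3, hfold3, _⟩ := pv_phase3 after row col (row - 1) (Nat.le_refl _) hrow d1
      (by
        intro j
        rw [hd1 j]
        by_cases h2 : 1 ≤ j ∧ j ≤ col - 1
        · rw [if_pos h2, if_pos h2, pvCf_zero_succ after (by omega), pvD]
        · rw [if_neg h2, if_neg h2])
    rw [hfold3]
    refine pv_map_range_congr ?_
    intro k hk
    rw [pvRows3, if_pos (by omega), pvFull]
    rfl
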